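-- pv_equiv track=rewrite | github.com/danieltamming/thesis | utils/preprocess.py | reduce_duplicates
-- ===== SOURCE A (Python) =====
-- def reduce_duplicates(s):
-- 	'''
-- 	Returns the strings with >= 3 conseecutive occurrences
-- 	of the same letter reduced to 2
-- 	'''
-- 	if len(s) <= 2:
-- 		return s
-- 	res = list(s[:2])
-- 	for c in s[2:]:
-- 		if c == res[-1] == res[-2]:
-- 			continue
-- 		res.append(c)
-- 	return ''.join(res)
-- ===== SOURCE B (Python) =====
-- def reduce_duplicates(s):
-- 	'''
-- 	Returns the strings with >= 3 conseecutive occurrences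
-- 	of the same letter reduced to 2
-- 	'''
-- 	return s[:2] + ''.join(c for c, p1, p2 in zip(s[2:], s[1:], s) if not (c == p1 == p2))
-- ===== Notes on version B (the rewrite author's own statement) =====
-- stated objective: idiomatic
-- what changed: Replaced the accumulator loop that looks back at the last two characters of the partial result with a single pointwise filter over zip(s[2:], s[1:], s), comparing each character against the two preceding characters of the ORIGINAL string (no mutable result list).
import Mathlib
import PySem

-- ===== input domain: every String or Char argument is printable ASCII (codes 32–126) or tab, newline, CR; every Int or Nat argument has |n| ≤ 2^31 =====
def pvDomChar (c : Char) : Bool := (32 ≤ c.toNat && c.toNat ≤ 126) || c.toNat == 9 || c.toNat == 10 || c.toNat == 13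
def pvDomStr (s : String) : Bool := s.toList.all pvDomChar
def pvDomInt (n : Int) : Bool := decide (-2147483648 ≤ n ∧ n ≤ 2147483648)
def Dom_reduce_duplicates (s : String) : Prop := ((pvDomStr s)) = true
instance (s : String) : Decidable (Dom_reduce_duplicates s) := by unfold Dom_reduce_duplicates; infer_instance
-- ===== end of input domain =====

-- B replaces A's accumulator-lookback loop by a single zip of three shifted views of the
-- original string filtered pointwise (objective: idiomatic/alternative; same O(n) cost).


-- ===== PORT A =====
-- `c == res[-1] == res[-2]` is `(c == res[-1]) and (res[-1] == res[-2])`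
def pvStepA (res : List Char) (c : Char) : List Char :=
  if PySem.List.pyGet? res (-1) = some c ∧ PySem.List.pyGet? res (-2) = PySem.List.pyGet? res (-1)
  then res
  else res ++ [c]

def reduce_duplicates (s : String) : String :=
  if PySem.Str.len s ≤ 2 then s
  else
    let res := PySem.List.slice s.toList none (some 2)          -- list(s[:2])
    String.ofList ((PySem.List.slice s.toList (some 2) none).foldl pvStepA res)  -- for c in s[2:] … ; ''.join(res)

-- ===== PORT B =====
def reduce_duplicates_alt (s : String) : String :=
  let l := s.toList
  String.ofList
    (PySem.List.slice l none (some 2) ++                        -- s[:2] +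
      (((PySem.List.slice l (some 2) none).zip
          ((PySem.List.slice l (some 1) none).zip l)).filter    -- zip(s[2:], s[1:], s)
        (fun p => !(p.1 == p.2.1 && p.2.1 == p.2.2))).map Prod.fst)

-- ===== PRECONDITION & SPEC =====
def Spec_reduce_duplicates (s : String) (out : String) : Prop := out = reduce_duplicates_alt s
instance (s : String) (out : String) : Decidable (Spec_reduce_duplicates s out) := by unfold Spec_reduce_duplicates; infer_instance

-- ===== CLAIM (what is proved, stated in full; the proofs are below) =====
def Claim_equal_reduce_duplicates : Prop := ∀ (s : String), Dom_reduce_duplicates s → Spec_reduce_duplicates s (reduce_duplicates s)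

-- ===== LEMMAS AND PROOFS =====

-- reference recursion: emit c unless it equals both of the two preceding ORIGINAL chars
def pvG : List Char → Char → Char → List Char
  | [], _, _ => []
  | c :: t, x, y => if c = y ∧ y = x then pvG t y c else c :: pvG t y c

lemma pvB_eq_pvG (t : List Char) (x y : Char) :
    ((t.zip ((y :: t).zip (x :: y :: t))).filter
        (fun p => !(p.1 == p.2.1 && p.2.1 == p.2.2))).map Prod.fst = pvG t x y := by
  induction t generalizing x y with
  | nil => rfl
  | cons c t ih =>
      have key := ih y c
      simp only [List.zip_cons_cons] at key ⊢
      simp only [Bool.not_and] at key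
      by_cases h : c = y ∧ y = x
      · obtain ⟨hc, hy⟩ := h
        subst hc hy
        simp [pvG, key]
      · rcases Decidable.not_and_iff_or_not.mp h with h1 | h1 <;>
          simp [pvG, h1, key]

lemma pvA_fold (t : List Char) (x y : Char) (acc : List Char) :
    List.foldl pvStepA (acc ++ [x, y]) t = acc ++ [x, y] ++ pvG t x y := by
  induction t generalizing x y acc with
  | nil => simp [pvG]
  | cons c t ih =>
      have h1 : PySem.List.pyGet? (acc ++ [x, y]) (-1) = some y := by
        have := PySem.List.pyGet?_neg_one_append_singleton (xs := acc ++ [x]) (x := y)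
        simpa using this
      have h2 : PySem.List.pyGet? (acc ++ [x, y]) (-2) = some x := by
        rw [PySem.List.pyGet?_neg_ofNat (acc ++ [x, y]) 2 (by omega) (by simp)]
        simp
      rw [List.foldl_cons]
      by_cases h : c = y ∧ y = x
      · obtain ⟨hc, hy⟩ := h
        subst hc hy
        have hstep : pvStepA (acc ++ [c, c]) c = acc ++ [c, c] := by
          unfold pvStepA; rw [h1, h2]; simp
        rw [hstep]
        have := ih c c acc
        simpa [pvG] using this
      · have hstep : pvStepA (acc ++ [x, y]) c = acc ++ [x, y] ++ [c] := by
          unfold pvStepA; rw [h1, h2, if_neg]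
          intro hh
          exact h ⟨(Option.some_inj.mp hh.1).symm, (Option.some_inj.mp hh.2).symm⟩
        rw [hstep, show acc ++ [x, y] ++ [c] = (acc ++ [x]) ++ [y, c] by simp,
            ih y c (acc ++ [x])]
        simp [pvG, h]

-- ===== VERDICT (by name: the statement is the Claim_ definition above) =====
theorem reduce_duplicates_spec : Claim_equal_reduce_duplicates := by
  intro s _
  simp only [Spec_reduce_duplicates, reduce_duplicates, reduce_duplicates_alt]
  rw [PySem.List.slice_to s.toList (by omega : (0:Int) ≤ 2),
      PySem.List.slice_from s.toList (by omega : (0:Int) ≤ 2),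
      PySem.List.slice_from s.toList (by omega : (0:Int) ≤ 1)]
  have hlen_eq : PySem.Str.len s = (s.toList.length : Int) := PySem.Str.len_eq s
  by_cases hlen : PySem.Str.len s ≤ 2
  · rw [if_pos hlen]
    have hl2 : s.toList.length ≤ 2 := by omega
    have hdrop : s.toList.drop (2:Int).toNat = [] := List.drop_eq_nil_of_le hl2
    rw [hdrop]
    simp [List.take_of_length_le hl2]
  · rw [if_neg hlen]
    have hl : 2 < s.toList.length := by omega
    rcases hx : s.toList with _ | ⟨x, _ | ⟨y, t⟩⟩
    · rw [hx] at hl; simp at hl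
    · rw [hx] at hl; simp at hl
    · have hA := pvA_fold t x y []
      simp only [List.nil_append] at hA
      have e2 : List.take (Int.toNat 2) (x :: y :: t) = [x, y] := rfl
      have e3 : List.drop (Int.toNat 2) (x :: y :: t) = t := rfl
      have e4 : List.drop (Int.toNat 1) (x :: y :: t) = y :: t := rfl
      rw [e2, e3, e4, hA, pvB_eq_pvG]
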